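-- pv_equiv track=rewrite | github.com/Nurtal/DMAP | parse.py | build_links
-- ===== SOURCE A (Python) =====
-- def build_links(node_to_dependencies):
--     """ """
--
--     links = []
--     for n in node_to_dependencies:
--         source_list = node_to_dependencies[n]
--         for source in source_list:
--             l = (source, n)
--             if l not in links:
--                 links.append(l)
--     return links
-- ===== SOURCE B (Python) =====
-- def build_links(node_to_dependencies):
--     """ """
--     pairs = [(source, n) for n in node_to_dependencies
--                          for source in node_to_dependencies[n]]
--     links = []
--     while pairs:
--         head = pairs[0]
--         links.append(head)
--         pairs = [p for p in pairs[1:] if p != head]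
--     return links
-- ===== Notes on version B (the rewrite author's own statement) =====
-- stated objective: alternative
-- what changed: B first materializes all (source, node) pairs with no dedup, then deduplicates by a repeated-filtering nub: take the head as the next output and filter every copy of it out of the remainder, so no membership test or seen-structure exists at all, unlike A's interleaved 'l not in links' scan while building.
import Mathlib
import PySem

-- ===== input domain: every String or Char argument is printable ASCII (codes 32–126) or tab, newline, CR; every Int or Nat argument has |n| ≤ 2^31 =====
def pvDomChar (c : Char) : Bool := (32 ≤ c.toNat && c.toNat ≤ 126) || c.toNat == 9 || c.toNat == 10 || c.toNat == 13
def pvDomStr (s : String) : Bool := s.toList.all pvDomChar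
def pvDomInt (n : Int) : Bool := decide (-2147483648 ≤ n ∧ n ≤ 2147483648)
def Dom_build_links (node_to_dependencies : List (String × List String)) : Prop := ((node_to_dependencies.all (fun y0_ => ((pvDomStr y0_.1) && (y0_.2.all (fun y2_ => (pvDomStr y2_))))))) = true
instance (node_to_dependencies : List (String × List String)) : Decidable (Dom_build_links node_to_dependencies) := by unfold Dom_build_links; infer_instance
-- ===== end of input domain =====

-- B first materializes all (source, node) pairs, then deduplicates by repeated
-- filtering (emit the head, filter every copy of it out of the remainder) with no
-- membership test or seen-structure; A interleaves a 'l not in links' scan while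
-- building. Same cost class; the objective is an alternative decomposition.
-- The dict parameter arrives as an association list; both ports normalise it with
-- PySem.Dict.ofList (= what Python's dict construction does at the call boundary).

-- ===== PORT A =====
def build_links (node_to_dependencies : List (String × List String)) : List (String × String) :=
  let d := PySem.Dict.ofList node_to_dependencies
  -- for n in d: source_list = d[n]  — dict keys are unique, so d[n] is the entry's own value kv.2
  d.items.foldl (fun links kv =>
    kv.2.foldl (fun links source =>
      let l := (source, kv.1)
      if links.contains l then links else links ++ [l]) links) []

-- ===== PORT B =====
-- B's while loop: links.append(pairs[0]); pairs = [p for p in pairs[1:] if p != head].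
-- The recursion is on the shrinking 'pairs' list, exactly the loop's state.
def pvNubLoop (pairs : List (String × String)) : List (String × String) :=
  match pairs with
  | [] => []
  | head :: rest => head :: pvNubLoop (rest.filter (fun p => p != head))
termination_by pairs.length
decreasing_by
  simp
  exact le_trans (List.length_filter_le _ _) (by simp)

def build_links_alt (node_to_dependencies : List (String × List String)) : List (String × String) :=
  let d := PySem.Dict.ofList node_to_dependencies
  let pairs := d.items.flatMap (fun kv => kv.2.map (fun source => (source, kv.1)))
  pvNubLoop pairs

-- ===== PRECONDITION & SPEC =====
def Spec_build_links (node_to_dependencies : List (String × List String)) (out : List (String × String)) : Prop := out = build_links_alt node_to_dependencies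
instance (node_to_dependencies : List (String × List String)) (out : List (String × String)) : Decidable (Spec_build_links node_to_dependencies out) := by unfold Spec_build_links; infer_instance

-- ===== CLAIM (what is proved, stated in full; the proofs are below) =====
def Claim_equal_build_links : Prop := ∀ (node_to_dependencies : List (String × List String)), Dom_build_links node_to_dependencies → Spec_build_links node_to_dependencies (build_links node_to_dependencies)

-- ===== LEMMAS AND PROOFS =====

-- A's inner loop over one source_list is s.update(map) on the accumulator-as-set
theorem inner_loop_eq_update (n : String) (deps : List String) (links : List (String × String)) :
    deps.foldl (fun links source =>
      let l := (source, n)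
      if links.contains l then links else links ++ [l]) links
    = PySem.Set.update links (deps.map (fun source => (source, n))) := by
  rw [PySem.Set.update_map_eq_foldl_add]
  rfl

-- A's outer loop accumulates updates = one update by the flattened pair list
theorem outer_loop_eq_update (l : List (String × List String)) (s : List (String × String)) :
    l.foldl (fun links kv => PySem.Set.update links (kv.2.map (fun source => (source, kv.1)))) s
    = PySem.Set.update s (l.flatMap (fun kv => kv.2.map (fun source => (source, kv.1)))) := by
  induction l generalizing s with
  | nil => simp [PySem.Set.update_nil]
  | cons kv t ih => simp [List.foldl_cons, ih, PySem.Set.update_append]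

-- ofList commutes with filter (first occurrences survive filtering either way)
theorem ofList_filter (p : String × String → Bool) (xs : List (String × String)) :
    PySem.Set.ofList (xs.filter p) = (PySem.Set.ofList xs).filter p := by
  induction xs with
  | nil => rfl
  | cons y t ih =>
    by_cases hy : p y = true
    · simp only [List.filter_cons, hy, if_true, PySem.Set.ofList_cons, PySem.Set.discard, ih,
        List.filter_filter]
      congr 1
      exact List.filter_congr (fun z _ => by rw [Bool.and_comm])
    · simp only [List.filter_cons, hy, Bool.false_eq_true, if_false, PySem.Set.ofList_cons,
        PySem.Set.discard, ih, List.filter_filter]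
      refine List.filter_congr (fun z hz => ?_)
      by_cases h : z = y
      · subst h; simp [Bool.not_eq_true] at hy; simp [hy]
      · simp [h]

-- B's repeated-filtering loop computes first-occurrence dedup
theorem pvNubLoop_eq_ofList (xs : List (String × String)) :
    pvNubLoop xs = PySem.Set.ofList xs :=
  match xs with
  | [] => by rw [pvNubLoop]; rfl
  | head :: rest => by
    rw [pvNubLoop, pvNubLoop_eq_ofList (rest.filter (fun p => p != head)),
      ofList_filter, PySem.Set.ofList_cons, PySem.Set.discard]
    simp [bne]
termination_by xs.length
decreasing_by
  simp
  exact le_trans (List.length_filter_le _ _) (by simp)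

-- ===== VERDICT (by name: the statement is the Claim_ definition above) =====
theorem build_links_spec : Claim_equal_build_links := by
  intro ntd _
  show build_links ntd = build_links_alt ntd
  unfold build_links build_links_alt
  rw [pvNubLoop_eq_ofList, ← PySem.Set.update_nil_left, ← outer_loop_eq_update]
  exact PySem.List.foldl_congr_mem _ _ _ _ (by intro links kv _; exact inner_loop_eq_update kv.1 kv.2 links)
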